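-- pv_equiv track=rewrite | github.com/mtakeshi1/djangosample | cardapio_parser.py | connect_suffixes
-- ===== SOURCE A (Python) =====
-- from typing import List, Optional
--
-- suffix_connectors = ['suco', 'leite', 'assado', 'com ', 'sugo', 'c/ ', 'iogurte', 'shake', 'acebolado', '(', 'refogado',
--                      'e ', 'preto', 'americana', 'vitamina']
--
-- def starts_with_any(s: str, candidates: List[str]) -> bool:
--     for c in candidates:
--         if s.strip().lower().startswith(c):
--             return True
--     return False
--
-- def connect_suffixes(page: List[str]) -> List[str]:
--     acc = []
--     i = 0
--     while i < len(page):
--         if i < len(page) - 1 and starts_with_any(page[i + 1], suffix_connectors):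
--             tmp = page[i].strip() + ' '
--             while i < len(page) - 1 and starts_with_any(page[i + 1], suffix_connectors):
--                 i += 1
--                 tmp = tmp + page[i].strip() + ' '
--
--             acc.append(tmp.strip())
--             i += 1
--         else:
--             acc.append(page[i])
--             i += 1
--     return acc
-- ===== SOURCE B (Python) =====
-- from typing import List
--
-- suffix_connectors = ['suco', 'leite', 'assado', 'com ', 'sugo', 'c/ ', 'iogurte', 'shake', 'acebolado', '(', 'refogado',
--                      'e ', 'preto', 'americana', 'vitamina']
--
-- def starts_with_any(s: str, candidates: List[str]) -> bool:
--     for c in candidates: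
--         if s.strip().lower().startswith(c):
--             return True
--     return False
--
-- def connect_suffixes(page: List[str]) -> List[str]:
--     # single forward pass: keep the current group, flush it when a non-connector starts a new one
--     out: List[str] = []
--     cur: List[str] = []
--     for e in page:
--         if cur and starts_with_any(e, suffix_connectors):
--             cur.append(e)
--         else:
--             if cur:
--                 out.append(_emit(cur))
--             cur = [e]
--     if cur:
--         out.append(_emit(cur))
--     return out
--
-- def _emit(group: List[str]) -> str:
--     if len(group) == 1:
--         return group[0]
--     return ' '.join(x.strip() for x in group).strip()
-- ===== Notes on version B (the rewrite author's own statement) =====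
-- stated objective: simpler
-- what changed: Replaced A's index-based nested while loops (with manual string concatenation of the running tmp) by a single forward pass that accumulates the current group in a list and emits each group on flush: a one-element group raw, a longer group as the strip of the space-join of its stripped members.
import Mathlib
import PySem

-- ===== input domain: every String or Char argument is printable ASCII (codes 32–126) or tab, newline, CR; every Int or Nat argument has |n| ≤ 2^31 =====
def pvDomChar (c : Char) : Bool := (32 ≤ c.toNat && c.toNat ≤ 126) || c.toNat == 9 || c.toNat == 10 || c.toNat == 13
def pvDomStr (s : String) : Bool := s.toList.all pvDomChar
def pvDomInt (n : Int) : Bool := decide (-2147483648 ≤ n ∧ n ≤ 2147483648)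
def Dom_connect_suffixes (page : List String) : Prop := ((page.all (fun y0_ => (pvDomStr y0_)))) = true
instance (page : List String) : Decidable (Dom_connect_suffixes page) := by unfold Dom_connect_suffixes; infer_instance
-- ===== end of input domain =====

-- B replaces A's index-juggling nested while loops by a single forward pass that keeps the
-- current group in an accumulator and flushes it when a non-connector element starts a new
-- group (objective: simpler; same O(n) cost; return value only, neither side mutates input).

-- ===== PORT A =====
def pvConns : List String :=
  ["suco", "leite", "assado", "com ", "sugo", "c/ ", "iogurte", "shake", "acebolado", "(",
   "refogado", "e ", "preto", "americana", "vitamina"]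

def starts_with_any (s : String) (candidates : List String) : Bool :=
  match candidates with
  | [] => false
  | c :: rest =>
    if PySem.Str.startswith (PySem.Str.lower (PySem.Str.strip s)) c then true
    else starts_with_any s rest

-- A's inner while: absorb successive connector-starting elements into tmp (a Python string,
-- ported exactly as its character list)
def pvAbsorbA (tmp : List Char) : List String → List Char × List String
  | [] => (tmp, [])
  | y :: rest =>
    if starts_with_any y pvConns then
      pvAbsorbA (tmp ++ (PySem.Str.strip y).toList ++ [' ']) rest
    else (tmp, y :: rest)

lemma pvAbsorbA_len (l : List String) : ∀ tmp, (pvAbsorbA tmp l).2.length ≤ l.length := by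
  induction l with
  | nil => intro tmp; simp [pvAbsorbA]
  | cons y rest ih =>
    intro tmp
    simp only [pvAbsorbA]
    split
    · exact le_trans (ih _) (by simp)
    · simp

-- A's outer while over the index i, as recursion on the remaining suffix of the page
def pvLoopA : List String → List String
  | [] => []
  | [x] => [x]
  | x :: y :: rest =>
    if h : starts_with_any y pvConns then
      String.ofList (PySem.Chars.strip (pvAbsorbA ((PySem.Str.strip x).toList ++ [' ']) (y :: rest)).1)
        :: pvLoopA (pvAbsorbA ((PySem.Str.strip x).toList ++ [' ']) (y :: rest)).2
    else
      x :: pvLoopA (y :: rest)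
termination_by l => l.length
decreasing_by
  · have hgen : ∀ tmp : List Char, (pvAbsorbA tmp (y :: rest)).2.length < rest.length + 1 + 1 := by
      intro tmp
      simp only [pvAbsorbA, h, if_true]
      exact Nat.lt_of_le_of_lt (pvAbsorbA_len rest _) (by omega)
    exact hgen _
  · simp

def connect_suffixes (page : List String) : List String := pvLoopA page

-- ===== PORT B =====
def pvEmit (g : List String) : String :=
  if g.length = 1 then g.headD ""
  else PySem.Str.strip (PySem.Str.join " " (g.map PySem.Str.strip))

def pvStepB (st : List String × List String) (e : String) : List String × List String :=
  if st.2 ≠ [] ∧ starts_with_any e pvConns then (st.1, st.2 ++ [e])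
  else ((if st.2 ≠ [] then st.1 ++ [pvEmit st.2] else st.1), [e])

def connect_suffixes_alt (page : List String) : List String :=
  let st := page.foldl pvStepB ([], [])
  if st.2 ≠ [] then st.1 ++ [pvEmit st.2] else st.1

-- ===== PRECONDITION & SPEC =====
def Spec_connect_suffixes (page : List String) (out : List String) : Prop := out = connect_suffixes_alt page
instance (page : List String) (out : List String) : Decidable (Spec_connect_suffixes page out) := by unfold Spec_connect_suffixes; infer_instance

-- ===== CLAIM (what is proved, stated in full; the proofs are below) =====
def Claim_equal_connect_suffixes : Prop := ∀ (page : List String), Dom_connect_suffixes page → Spec_connect_suffixes page (connect_suffixes page)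

-- ===== LEMMAS AND PROOFS =====

-- final flush of B's loop state
def pvFlush (st : List String × List String) : List String :=
  if st.2 ≠ [] then st.1 ++ [pvEmit st.2] else st.1

-- the Python string A's tmp holds after absorbing exactly the group g
def pvTmpOf (g : List String) : List Char :=
  g.flatMap (fun s => (PySem.Str.strip s).toList ++ [' '])

lemma pvRstrip_sp (u : List Char) : PySem.Chars.rstrip (u ++ [' ']) = PySem.Chars.rstrip u := by
  have h : PySem.Chars.isspace ' ' = true := by decide
  simp [PySem.Chars.rstrip, h]

lemma pvStrip_sp (u : List Char) : PySem.Chars.strip (u ++ [' ']) = PySem.Chars.strip u := by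
  have h : PySem.Chars.isspace ' ' = true := by decide
  simp only [PySem.Chars.strip, PySem.Chars.lstrip, List.dropWhile_append]
  split_ifs with h2
  · simp [h, PySem.Chars.rstrip, List.isEmpty_iff.mp h2]
  · exact pvRstrip_sp _

lemma pvTmpOf_join : ∀ (g : List String), g ≠ [] →
    pvTmpOf g = PySem.Chars.join [' '] (g.map (fun s => (PySem.Str.strip s).toList)) ++ [' '] := by
  intro g
  induction g with
  | nil => simp
  | cons x r ih =>
    intro _
    cases r with
    | nil => simp [pvTmpOf, PySem.Chars.join_singleton]
    | cons y r' =>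
      simp only [pvTmpOf] at ih ⊢
      rw [List.flatMap_cons, ih (by simp)]
      simp [PySem.Chars.join_cons_cons]

lemma pvEmit_eq (g : List String) (hg : 2 ≤ g.length) :
    pvEmit g = String.ofList (PySem.Chars.strip (pvTmpOf g)) := by
  have hne : g ≠ [] := by cases g <;> simp_all
  rw [pvTmpOf_join g hne, pvStrip_sp]
  apply String.toList_inj.mp
  simp [pvEmit, PySem.Chars.strip, show g.length ≠ 1 by omega, Function.comp_def]

lemma pvMainAux : ∀ (n : Nat) (page : List String), page.length ≤ n → ∀ (x : String) (out : List String),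
    pvFlush (page.foldl pvStepB (out, [x])) = out ++ pvLoopA (x :: page) := by
  intro n
  induction n with
  | zero =>
    intro page hlen x out
    have : page = [] := by cases page <;> simp_all
    subst this
    simp [pvFlush, pvEmit, pvLoopA]
  | succ n ih =>
    -- inner lemma: B's loop while the current group (≥ 2 elements) is still absorbing,
    -- aligned with A's pvAbsorbA on the same suffix
    have inner : ∀ (r : List String), r.length ≤ n → ∀ (out cur : List String), 2 ≤ cur.length →
        pvFlush (r.foldl pvStepB (out, cur)) =
          out ++ String.ofList (PySem.Chars.strip (pvAbsorbA (pvTmpOf cur) r).1)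
              :: pvLoopA (pvAbsorbA (pvTmpOf cur) r).2 := by
      intro r
      induction r with
      | nil =>
        intro _ out cur hcur
        have hne : cur ≠ [] := by cases cur <;> simp_all
        simp [pvFlush, pvAbsorbA, hne, pvLoopA, pvEmit_eq cur hcur]
      | cons z r' ihr =>
        intro hlen out cur hcur
        have hne : cur ≠ [] := by cases cur <;> simp_all
        by_cases hz : starts_with_any z pvConns
        · have hstep : pvStepB (out, cur) z = (out, cur ++ [z]) := by
            simp [pvStepB, hne, hz]
          have htmp : pvTmpOf (cur ++ [z]) = pvTmpOf cur ++ (PySem.Str.strip z).toList ++ [' '] := by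
            simp [pvTmpOf]
          have habs : pvAbsorbA (pvTmpOf cur) (z :: r')
              = pvAbsorbA (pvTmpOf cur ++ (PySem.Str.strip z).toList ++ [' ']) r' := by
            simp [pvAbsorbA, hz]
          rw [List.foldl_cons, hstep, habs, ← htmp]
          exact ihr (by simp only [List.length_cons] at hlen; omega) out (cur ++ [z]) (by simp; omega)
        · have hstep : pvStepB (out, cur) z = (out ++ [pvEmit cur], [z]) := by
            simp [pvStepB, hz, hne]
          have habs : pvAbsorbA (pvTmpOf cur) (z :: r') = (pvTmpOf cur, z :: r') := by
            simp [pvAbsorbA, hz]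
          rw [List.foldl_cons, hstep, habs,
              ih r' (by simp only [List.length_cons] at hlen; omega) z (out ++ [pvEmit cur])]
          simp [pvEmit_eq cur hcur]
    intro page hlen x out
    cases page with
    | nil => simp [pvFlush, pvEmit, pvLoopA]
    | cons y rest =>
      by_cases hy : starts_with_any y pvConns
      · have hstep : pvStepB (out, [x]) y = (out, [x, y]) := by
          simp [pvStepB, hy]
        have htmp : pvTmpOf [x, y]
            = (PySem.Str.strip x).toList ++ [' '] ++ (PySem.Str.strip y).toList ++ [' '] := by
          simp [pvTmpOf]
        have habs : pvAbsorbA ((PySem.Str.strip x).toList ++ [' ']) (y :: rest)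
            = pvAbsorbA (pvTmpOf [x, y]) rest := by
          simp [pvAbsorbA, hy, htmp]
        rw [List.foldl_cons, hstep,
            inner rest (by simp only [List.length_cons] at hlen; omega) out [x, y] (by simp)]
        rw [pvLoopA, dif_pos hy, habs]
      · have hstep : pvStepB (out, [x]) y = (out ++ [pvEmit [x]], [y]) := by
          simp [pvStepB, hy]
        have hx : pvEmit [x] = x := by simp [pvEmit]
        rw [List.foldl_cons, hstep, hx,
            ih rest (by simp only [List.length_cons] at hlen; omega) y (out ++ [x])]
        rw [pvLoopA, dif_neg hy]
        simp

-- ===== VERDICT (by name: the statement is the Claim_ definition above) =====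
theorem connect_suffixes_spec : Claim_equal_connect_suffixes := by
  intro page _
  unfold Spec_connect_suffixes connect_suffixes connect_suffixes_alt
  cases page with
  | nil => simp [pvLoopA]
  | cons x rest =>
    have hstep : pvStepB ([], []) x = ([], [x]) := by simp [pvStepB]
    have := pvMainAux rest.length rest le_rfl x []
    simp only [List.foldl_cons, hstep, pvFlush] at this ⊢
    simpa using this.symm
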